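-- pv_equiv track=rewrite | github.com/gatencia/SOLOMUSE-Bayes-Implementation | hardcoded_improv/improv_engine.py | _clamp_jump_by_octave
-- ===== SOURCE A (Python) =====
-- def _clamp_jump_by_octave(midi_note: int, prev_midi: int, max_jump: int = 9) -> int:
--     n = int(midi_note)
--     if abs(n - prev_midi) <= max_jump:
--         return n
--
--     while n - prev_midi > max_jump and n - 12 >= 36:
--         n -= 12
--     while prev_midi - n > max_jump and n + 12 <= 96:
--         n += 12
--
--     if n - prev_midi > max_jump:
--         n = prev_midi + max_jump
--     elif prev_midi - n > max_jump:
--         n = prev_midi - max_jump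
--
--     return int(max(36, min(96, n)))
-- ===== SOURCE B (Python) =====
-- def _clamp_jump_by_octave(midi_note: int, prev_midi: int, max_jump: int = 9) -> int:
--     n = int(midi_note)
--     if abs(n - prev_midi) <= max_jump:
--         return n
--     if n - prev_midi > max_jump:
--         # number of downward octave shifts, in closed form
--         k = min(-((prev_midi + max_jump - n) // 12), (n - 36) // 12)
--         if k > 0:
--             n -= 12 * k
--     if prev_midi - n > max_jump:
--         # number of upward octave shifts, in closed form
--         k = min(-((n - prev_midi + max_jump) // 12), (96 - n) // 12)
--         if k > 0:
--             n += 12 * k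
--     if n - prev_midi > max_jump:
--         n = prev_midi + max_jump
--     elif prev_midi - n > max_jump:
--         n = prev_midi - max_jump
--     return max(36, min(96, n))
-- ===== Notes on version B (the rewrite author's own statement) =====
-- stated objective: faster
-- what changed: The two octave-stepping while loops are replaced by closed-form floor-division counts of the needed octave shifts, applied in one arithmetic step each.
import Mathlib
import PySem

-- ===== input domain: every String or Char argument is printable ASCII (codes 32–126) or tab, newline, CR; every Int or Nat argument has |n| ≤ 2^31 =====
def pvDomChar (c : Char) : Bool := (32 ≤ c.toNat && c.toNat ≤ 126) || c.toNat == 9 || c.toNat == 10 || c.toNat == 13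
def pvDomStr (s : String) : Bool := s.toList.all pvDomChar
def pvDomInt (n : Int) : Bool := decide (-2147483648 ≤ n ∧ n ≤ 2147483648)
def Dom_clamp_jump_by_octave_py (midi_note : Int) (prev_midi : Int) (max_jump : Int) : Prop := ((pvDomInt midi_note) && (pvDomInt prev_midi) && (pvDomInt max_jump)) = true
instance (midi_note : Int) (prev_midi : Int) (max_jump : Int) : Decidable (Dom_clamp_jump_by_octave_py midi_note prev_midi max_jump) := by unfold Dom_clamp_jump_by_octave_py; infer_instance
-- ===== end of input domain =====

-- B replaces A's two octave-stepping while loops by closed-form floor-division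
-- step counts (objective: faster — one arithmetic step instead of a loop linear
-- in the distance).

-- ===== PORT A =====
-- first while loop: while n - prev_midi > max_jump and n - 12 >= 36: n -= 12
def pvLoopDown (prev_midi : Int) (max_jump : Int) (n : Int) : Int :=
  if n - prev_midi > max_jump ∧ n - 12 ≥ 36 then pvLoopDown prev_midi max_jump (n - 12) else n
termination_by n.toNat
decreasing_by omega

-- second while loop: while prev_midi - n > max_jump and n + 12 <= 96: n += 12
def pvLoopUp (prev_midi : Int) (max_jump : Int) (n : Int) : Int :=
  if prev_midi - n > max_jump ∧ n + 12 ≤ 96 then pvLoopUp prev_midi max_jump (n + 12) else n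
termination_by (96 - n).toNat
decreasing_by omega

def clamp_jump_by_octave_py (midi_note : Int) (prev_midi : Int) (max_jump : Int) : Int :=
  let n := midi_note
  if |n - prev_midi| ≤ max_jump then n
  else
    let n := pvLoopDown prev_midi max_jump n
    let n := pvLoopUp prev_midi max_jump n
    let n := if n - prev_midi > max_jump then prev_midi + max_jump
             else if prev_midi - n > max_jump then prev_midi - max_jump
             else n
    max 36 (min 96 n)

-- ===== PORT B =====
def clamp_jump_by_octave_py_alt (midi_note : Int) (prev_midi : Int) (max_jump : Int) : Int :=
  let n := midi_note
  if |n - prev_midi| ≤ max_jump then n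
  else
    -- downward octave shifts in closed form
    let n :=
      if n - prev_midi > max_jump then
        let k := min (-(PySem.Int.floordiv (prev_midi + max_jump - n) 12))
                     (PySem.Int.floordiv (n - 36) 12)
        if k > 0 then n - 12 * k else n
      else n
    -- upward octave shifts in closed form
    let n :=
      if prev_midi - n > max_jump then
        let k := min (-(PySem.Int.floordiv (n - prev_midi + max_jump) 12))
                     (PySem.Int.floordiv (96 - n) 12)
        if k > 0 then n + 12 * k else n
      else n
    let n := if n - prev_midi > max_jump then prev_midi + max_jump
             else if prev_midi - n > max_jump then prev_midi - max_jump
             else n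
    max 36 (min 96 n)

-- ===== PRECONDITION & SPEC =====
def Spec_clamp_jump_by_octave_py (midi_note : Int) (prev_midi : Int) (max_jump : Int) (out : Int) : Prop := out = clamp_jump_by_octave_py_alt midi_note prev_midi max_jump
instance (midi_note : Int) (prev_midi : Int) (max_jump : Int) (out : Int) : Decidable (Spec_clamp_jump_by_octave_py midi_note prev_midi max_jump out) := by unfold Spec_clamp_jump_by_octave_py; infer_instance

-- ===== CLAIM (what is proved, stated in full; the proofs are below) =====
def Claim_equal_clamp_jump_by_octave_py : Prop := ∀ (midi_note : Int) (prev_midi : Int) (max_jump : Int), Dom_clamp_jump_by_octave_py midi_note prev_midi max_jump → Spec_clamp_jump_by_octave_py midi_note prev_midi max_jump (clamp_jump_by_octave_py midi_note prev_midi max_jump)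

-- ===== LEMMAS AND PROOFS =====

-- closed form of the first while loop
theorem pvLoopDown_eq (prev_midi max_jump n : Int) :
    pvLoopDown prev_midi max_jump n =
      (if n - prev_midi > max_jump then
        if 0 < min (-((prev_midi + max_jump - n) / 12)) ((n - 36) / 12) then
          n - 12 * min (-((prev_midi + max_jump - n) / 12)) ((n - 36) / 12)
        else n
      else n) := by
  fun_induction pvLoopDown prev_midi max_jump n with
  | case1 n hc ih => rw [ih]; split_ifs <;> omega
  | case2 n hc => split_ifs <;> omega

-- closed form of the second while loop
theorem pvLoopUp_eq (prev_midi max_jump n : Int) :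
    pvLoopUp prev_midi max_jump n =
      (if prev_midi - n > max_jump then
        if 0 < min (-((n - prev_midi + max_jump) / 12)) ((96 - n) / 12) then
          n + 12 * min (-((n - prev_midi + max_jump) / 12)) ((96 - n) / 12)
        else n
      else n) := by
  fun_induction pvLoopUp prev_midi max_jump n with
  | case1 n hc ih => rw [ih]; split_ifs <;> omega
  | case2 n hc => split_ifs <;> omega

-- ===== VERDICT (by name: the statement is the Claim_ definition above) =====
theorem clamp_jump_by_octave_py_spec : Claim_equal_clamp_jump_by_octave_py := by
  intro midi_note prev_midi max_jump _
  unfold Spec_clamp_jump_by_octave_py clamp_jump_by_octave_py clamp_jump_by_octave_py_alt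
  simp only [pvLoopDown_eq, pvLoopUp_eq,
    PySem.Int.floordiv_eq_ediv_of_pos (b := (12:Int)) (by norm_num : (0:Int) < 12)]
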